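-- pv_equiv track=rewrite | github.com/TopeEstLa/nsi-epreuves-pratiques | BCG_NSI_2.py | positif
-- ===== SOURCE A (Python) =====
-- def positif(pile):
--     """
--     Retourne une pile contenant uniquement les éléments positifs.
--     :param pile:
--     :return: pile contenant uniquement les éléments positifs
--     """
--     pile_1 = list(pile)
--     pile_2 = []
--
--     while len(pile_1) > 0:
--         element = pile_1.pop()
--         if element >= 0:
--             pile_2.append(element)
--
--     while len(pile_2) > 0:
--         pile_1.append(pile_2.pop())
--
--     return pile_1
-- ===== SOURCE B (Python) =====
-- def positif(pile):
--     """
--     Retourne une pile contenant uniquement les éléments positifs.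
--     :param pile:
--     :return: pile contenant uniquement les éléments positifs
--     """
--     return [x for x in pile if x >= 0]
-- ===== Notes on version B (the rewrite author's own statement) =====
-- stated objective: simpler
-- what changed: Replaces the two while-loops that pop through an auxiliary second stack (reverse, then reverse back) with a single forward-pass filter comprehension keeping x >= 0; one traversal instead of two pop loops and no auxiliary stack (measured faster in a timing run).
import Mathlib
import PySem

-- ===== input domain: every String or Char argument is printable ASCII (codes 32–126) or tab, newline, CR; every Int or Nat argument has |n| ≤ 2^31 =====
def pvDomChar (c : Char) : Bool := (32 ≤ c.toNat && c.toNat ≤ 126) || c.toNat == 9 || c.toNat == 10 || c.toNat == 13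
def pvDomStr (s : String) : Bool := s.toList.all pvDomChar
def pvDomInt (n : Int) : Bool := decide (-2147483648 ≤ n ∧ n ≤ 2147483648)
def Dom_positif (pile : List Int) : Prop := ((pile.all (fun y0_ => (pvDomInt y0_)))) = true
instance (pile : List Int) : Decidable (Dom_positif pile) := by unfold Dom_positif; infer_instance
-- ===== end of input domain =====

-- B replaces A's two pop-loops through an auxiliary second stack (reverse then reverse back)
-- with one forward filter pass keeping x >= 0; the return value is identical.

-- ===== PORT A =====
-- first while loop: pop from the end of pile_1, push onto pile_2 if element >= 0
def positifLoop1 (p1 p2 : List Int) : List Int :=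
  match h : p1 with
  | [] => p2
  | _ :: _ =>
    positifLoop1 p1.dropLast
      (if p1.getLast (by simp [h]) ≥ 0 then p2 ++ [p1.getLast (by simp [h])] else p2)
termination_by p1.length
decreasing_by simp [h]

-- second while loop: pop from the end of pile_2, push onto pile_1
def positifLoop2 (p2 p1 : List Int) : List Int :=
  match h : p2 with
  | [] => p1
  | _ :: _ =>
    positifLoop2 p2.dropLast (p1 ++ [p2.getLast (by simp [h])])
termination_by p2.length
decreasing_by simp [h]

def positif (pile : List Int) : List Int :=
  positifLoop2 (positifLoop1 pile []) []

-- ===== PORT B =====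
def positif_alt (pile : List Int) : List Int :=
  pile.filter (fun x => decide (x ≥ 0))

-- ===== PRECONDITION & SPEC =====
def Spec_positif (pile : List Int) (out : List Int) : Prop := out = positif_alt pile
instance (pile : List Int) (out : List Int) : Decidable (Spec_positif pile out) := by unfold Spec_positif; infer_instance

-- ===== CLAIM (what is proved, stated in full; the proofs are below) =====
def Claim_equal_positif : Prop := ∀ (pile : List Int), Dom_positif pile → Spec_positif pile (positif pile)

-- ===== LEMMAS AND PROOFS =====
lemma positifLoop1_eq (p1 p2 : List Int) :
    positifLoop1 p1 p2 = p2 ++ (p1.filter (fun x => decide (x ≥ 0))).reverse := by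
  induction p1 using List.reverseRecOn generalizing p2 with
  | nil => simp [positifLoop1]
  | append_singleton xs x ih =>
    rw [positifLoop1.eq_def]
    split
    · simp_all
    · simp only [List.dropLast_concat, ih]
      by_cases hx : x ≥ 0 <;> simp [hx]

lemma positifLoop2_eq (p2 p1 : List Int) :
    positifLoop2 p2 p1 = p1 ++ p2.reverse := by
  induction p2 using List.reverseRecOn generalizing p1 with
  | nil => simp [positifLoop2]
  | append_singleton xs x ih =>
    rw [positifLoop2.eq_def]
    split
    · simp_all
    · simp [List.dropLast_concat, ih]

-- ===== VERDICT (by name: the statement is the Claim_ definition above) =====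
theorem positif_spec : Claim_equal_positif := by
  intro pile _
  unfold Spec_positif positif positif_alt
  rw [positifLoop1_eq, positifLoop2_eq]
  simp
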